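-- pv_equiv track=rewrite | github.com/yashlala/cpsc464-topdown | das_decennial/programs/cenrace.py | buildRaceDict
-- ===== SOURCE A (Python) =====
-- from itertools import product
--
-- def buildRaceDict(race_labels, reverse_keyval=False):
--     """
--     Modified from William's recode function(s)
--     Creates a mapping between an integer index, and strings of 1s and 0s representing all possible race label
--         combinations.
--     :param race_labels: A list of all race labels. Only the length is relevant.
--     :param reverse_keyval: If true, the values of the mapping will be the strings, and not the integer index.
--     :return: A mapping of string permutations of 1s and 0s and an integer index.
--     """
--     race_map = ["".join(x) for x in product("10", repeat=len(race_labels))]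
--     race_map.sort(key=lambda s: s.count("1"))
--     race_dict = {}
--
--     for i,k in enumerate(race_map[1:]):
--         ind = i + 1
--         if reverse_keyval:
--             race_dict[ind] = k
--         else:
--             race_dict[k] = ind
--
--     return race_dict
-- ===== SOURCE B (Python) =====
-- from itertools import product
--
-- def buildRaceDict(race_labels, reverse_keyval=False):
--     n = len(race_labels)
--     # counting sort by popcount: n+1 buckets, filled in product's generation order
--     buckets = [[] for _ in range(n + 1)]
--     for x in product("10", repeat=n):
--         s = "".join(x)
--         buckets[s.count("1")].append(s)
--     race_map = [s for b in buckets for s in b]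
--     if reverse_keyval:
--         return {ind: s for ind, s in enumerate(race_map[1:], 1)}
--     return {s: ind for ind, s in enumerate(race_map[1:], 1)}
-- ===== Notes on version B (the rewrite author's own statement) =====
-- stated objective: alternative
-- what changed: Replaces the stable comparison sort keyed by popcount with a counting sort: each generated string is appended to a popcount-indexed bucket in generation order and the buckets are concatenated in ascending popcount order.
-- outside the precondition, e.g. on buildRaceDict(['a'], True): A returns {1: '1'}, B returns {1: '1'}
import Mathlib
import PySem

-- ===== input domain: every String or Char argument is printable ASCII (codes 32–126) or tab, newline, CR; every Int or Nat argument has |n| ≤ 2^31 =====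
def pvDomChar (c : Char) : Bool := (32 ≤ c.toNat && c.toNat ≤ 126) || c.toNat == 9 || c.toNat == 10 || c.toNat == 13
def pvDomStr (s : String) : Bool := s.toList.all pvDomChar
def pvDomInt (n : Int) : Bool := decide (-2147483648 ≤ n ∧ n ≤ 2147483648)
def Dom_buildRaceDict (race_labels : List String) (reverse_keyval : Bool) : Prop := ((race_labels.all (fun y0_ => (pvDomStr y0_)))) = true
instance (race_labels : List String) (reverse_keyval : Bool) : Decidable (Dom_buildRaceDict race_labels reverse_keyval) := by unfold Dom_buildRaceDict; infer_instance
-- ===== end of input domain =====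

-- B replaces the stable comparison sort keyed by popcount with a counting sort into popcount-indexed
-- buckets (objective: alternative algorithm; the return-value equivalence below is on
-- reverse_keyval = false, see Pre_).

-- ===== PORT A =====
-- itertools.product("10", repeat=n), in Python's generation order (leftmost position varies slowest)
def pyProduct10 : Nat → List (List Char)
  | 0 => [[]]
  | n + 1 => ['1', '0'].flatMap (fun c => (pyProduct10 n).map (fun t => c :: t))

def buildRaceDict (race_labels : List String) (reverse_keyval : Bool) : List (String × Int) :=
  -- race_map = ["".join(x) for x in product("10", repeat=len(race_labels))]
  let race_map := (pyProduct10 race_labels.length).map (fun x => String.ofList x)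
  -- race_map.sort(key=lambda s: s.count("1"))  (stable)
  let race_map := PySem.List.sorted race_map (fun s => PySem.Str.count s "1")
  -- for i, k in enumerate(race_map[1:]): ind = i + 1; race_dict[k] = ind  (or race_dict[ind] = k)
  -- the reverse_keyval=True branch builds an int-keyed dict, not a value of the declared return type
  -- List (String × Int); that branch is excluded by Pre_ and the port leaves the dict unchanged there.
  let race_dict :=
    (PySem.List.enumerate (PySem.List.slice race_map (some 1) none) 0).foldl
      (fun d p => let ind := p.1 + 1
        if reverse_keyval then d else d.insert p.2 ind)
      PySem.Dict.empty
  race_dict.items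

-- ===== PORT B =====
def buildRaceDict_alt (race_labels : List String) (reverse_keyval : Bool) : List (String × Int) :=
  let n := race_labels.length
  -- buckets = [[] for _ in range(n + 1)]; for x in product: s = "".join(x); buckets[s.count("1")].append(s)
  -- (s is inlined; buckets[k] is in range since s.count("1") ≤ n)
  let buckets :=
    (pyProduct10 n).foldl
      (fun bs x =>
        bs.set (PySem.Str.count (String.ofList x) "1")
          (bs.getD (PySem.Str.count (String.ofList x) "1") [] ++ [String.ofList x]))
      (List.replicate (n + 1) ([] : List String))
  -- race_map = [s for b in buckets for s in b]
  let race_map := buckets.flatten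
  -- the reverse_keyval=True branch builds an int-keyed dict, not a value of the declared return type;
  -- excluded by Pre_, the port returns [] there.
  if reverse_keyval then []
  else
    (PySem.Dict.ofList
      ((PySem.List.enumerate (PySem.List.slice race_map (some 1) none) 1).map
        (fun p => (p.2, p.1)))).items

-- ===== PRECONDITION & SPEC =====
-- Pre_ excludes reverse_keyval=True, on which A returns an int-keyed dict — not a value of the
-- declared return type List (String × Int); only the length of race_labels is otherwise relevant.
def Pre_buildRaceDict (race_labels : List String) (reverse_keyval : Bool) : Prop :=
  reverse_keyval = false
instance (race_labels : List String) (reverse_keyval : Bool) : Decidable (Pre_buildRaceDict race_labels reverse_keyval) := by unfold Pre_buildRaceDict; infer_instance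

def pvWitness_buildRaceDict : List String × Bool := (["a", "b"], false)

def Spec_buildRaceDict (race_labels : List String) (reverse_keyval : Bool) (out : List (String × Int)) : Prop := out = buildRaceDict_alt race_labels reverse_keyval
instance (race_labels : List String) (reverse_keyval : Bool) (out : List (String × Int)) : Decidable (Spec_buildRaceDict race_labels reverse_keyval out) := by unfold Spec_buildRaceDict; infer_instance

-- ===== CLAIM (what is proved, stated in full; the proofs are below) =====
def Claim_equal_buildRaceDict : Prop := ∀ (race_labels : List String) (reverse_keyval : Bool), Dom_buildRaceDict race_labels reverse_keyval → Pre_buildRaceDict race_labels reverse_keyval → Spec_buildRaceDict race_labels reverse_keyval (buildRaceDict race_labels reverse_keyval)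

-- ===== LEMMAS AND PROOFS =====

-- s.count("1") is List.count '1' on the character list
theorem count_go_one (l : List Char) (fuel acc : Nat) (h : l.length ≤ fuel) :
    PySem.Chars.count.go ['1'] fuel l acc = acc + l.count '1' := by
  induction l generalizing fuel acc with
  | nil => cases fuel <;> simp [PySem.Chars.count.go]
  | cons c t ih =>
    cases fuel with
    | zero => simp at h
    | succ f =>
      have hf : t.length ≤ f := by simpa using h
      simp only [PySem.Chars.count.go]
      by_cases hc : c = '1'
      · subst hc
        rw [if_pos (by simp [List.isPrefixOf])]
        simp [ih _ _ hf]
        omega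
      · rw [if_neg (by simp [List.isPrefixOf]; exact fun hh => hc hh.symm)]
        simp [ih _ _ hf, hc]

theorem count_mk_one (cs : List Char) : PySem.Str.count (String.ofList cs) "1" = cs.count '1' := by
  rw [PySem.Str.count_eq]
  have h1 : (String.ofList cs).toList = cs := by simp
  have h2 : ("1" : String).toList = ['1'] := rfl
  rw [h1, h2]
  simp [PySem.Chars.count]
  simpa using count_go_one cs cs.length 0 le_rfl

theorem length_of_mem_pyProduct10 (n : Nat) (x : List Char) (hx : x ∈ pyProduct10 n) :
    x.length = n := by
  induction n generalizing x with
  | zero => simp [pyProduct10] at hx; simp [hx]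
  | succ m ih =>
    simp [pyProduct10] at hx
    rcases hx with ⟨t, ht, rfl⟩ | ⟨t, ht, rfl⟩ <;> simp [ih t ht]

theorem nodup_pyProduct10 (n : Nat) : (pyProduct10 n).Nodup := by
  induction n with
  | zero => simp [pyProduct10]
  | succ m ih =>
    simp only [pyProduct10, List.flatMap_cons, List.flatMap_nil, List.append_nil]
    refine List.Nodup.append ?_ ?_ ?_
    · exact ih.map (fun a b h => by simpa using h)
    · exact ih.map (fun a b h => by simpa using h)
    · intro x hx hy
      simp at hx hy
      rcases hx with ⟨t, _, rfl⟩
      rcases hy with ⟨u, _, h⟩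
      simp at h

-- insertBy skips a prefix it does not go before, and goes to the front of an all-later suffix
theorem insertBy_append_not_before {α : Type} (before : α → α → Bool) (x : α) (A B : List α)
    (h : ∀ a ∈ A, before x a = false) :
    PySem.List.insertBy before x (A ++ B) = A ++ PySem.List.insertBy before x B := by
  induction A with
  | nil => simp
  | cons a t ih =>
    simp only [List.cons_append, PySem.List.insertBy]
    rw [h a (by simp)]
    simp [ih (fun a ha => h a (by simp [ha]))]

theorem insertBy_all_before {α : Type} (before : α → α → Bool) (x : α) (B : List α)
    (h : ∀ b ∈ B, before x b = true) :
    PySem.List.insertBy before x B = x :: B := by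
  cases B with
  | nil => rfl
  | cons b t => simp [PySem.List.insertBy, h b (by simp)]

-- a stable sort by a Nat key bounded by n is the concatenation of the key-fibres in key order
theorem sorted_eq_flatMap_filter {α : Type} (xs : List α) (key : α → Nat) (n : Nat)
    (h : ∀ x ∈ xs, key x ≤ n) :
    PySem.List.sorted xs key =
      (List.range (n + 1)).flatMap (fun v => xs.filter (fun x => decide (key x = v))) := by
  rw [PySem.List.sorted_eq_foldl_insertBy]
  induction xs using List.reverseRecOn with
  | nil => simp
  | append_singleton t x ih =>
    have ht : ∀ y ∈ t, key y ≤ n := fun y hy => h y (by simp [hy])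
    have hx : key x ≤ n := h x (by simp)
    rw [List.foldl_append, List.foldl_cons, List.foldl_nil, ih ht]
    have hsplit : List.range (n + 1) = List.range (key x + 1) ++ (List.range (n - key x)).map (fun j => (key x + 1) + j) := by
      rw [← List.range_add]
      congr 1
      omega
    set F := fun (l : List α) (v : Nat) => l.filter (fun y => decide (key y = v)) with hF
    have hfilt : ∀ v, F (t ++ [x]) v = F t v ++ (if key x = v then [x] else []) := by
      intro v
      simp [hF, List.filter_append]
      split_ifs with hv <;> simp [hv]
    rw [hsplit]
    rw [List.flatMap_append, List.flatMap_append]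
    have hlow : (List.range (key x + 1)).flatMap (F (t ++ [x])) =
        (List.range (key x + 1)).flatMap (F t) ++ [x] := by
      rw [List.range_succ, List.flatMap_append, List.flatMap_append]
      simp only [List.flatMap_singleton]
      have : ∀ v ∈ List.range (key x), F (t ++ [x]) v = F t v := by
        intro v hv
        simp at hv
        rw [hfilt]
        simp [Nat.ne_of_gt hv]
      rw [List.flatMap_congr this, hfilt, if_pos rfl, List.append_assoc]
    have hhigh : (List.map (fun j => key x + 1 + j) (List.range (n - key x))).flatMap (F (t ++ [x])) =
        (List.map (fun j => key x + 1 + j) (List.range (n - key x))).flatMap (F t) := by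
      apply List.flatMap_congr
      intro v hv
      simp at hv
      rcases hv with ⟨j, hj, rfl⟩
      rw [hfilt]
      simp
      omega
    rw [hlow, hhigh]
    have h1 : ∀ a ∈ List.flatMap (F t) (List.range (key x + 1)),
        (fun a b => decide (key a < key b)) x a = false := by
      intro a ha
      simp only [List.mem_flatMap] at ha
      rcases ha with ⟨v, hv, hav⟩
      simp at hv
      have := List.of_mem_filter hav
      simp at this
      simp [this]
      omega
    have h2 : ∀ b ∈ List.flatMap (F t) (List.map (fun j => key x + 1 + j) (List.range (n - key x))),
        (fun a b => decide (key a < key b)) x b = true := by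
      intro b hb
      simp only [List.mem_flatMap] at hb
      rcases hb with ⟨v, hv, hbv⟩
      simp at hv
      rcases hv with ⟨j, hj, rfl⟩
      have := List.of_mem_filter hbv
      simp at this
      simp [this]
      omega
    rw [insertBy_append_not_before _ _ _ _ h1, insertBy_all_before _ _ _ h2]
    simp [hF, List.append_assoc]

-- the bucket-filling fold appends each element to the bucket of its key
theorem bucket_fold {α β : Type} (key : α → Nat) (emb : α → β) (l : List α)
    (bs : List (List β)) (h : ∀ x ∈ l, key x < bs.length) :
    l.foldl (fun bs x => bs.set (key x) (bs.getD (key x) [] ++ [emb x])) bs =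
      (List.range bs.length).map
        (fun v => bs.getD v [] ++ (l.filter (fun x => decide (key x = v))).map emb) := by
  induction l generalizing bs with
  | nil =>
    simp only [List.foldl_nil, List.filter_nil, List.map_nil, List.append_nil]
    apply List.ext_getElem
    · simp
    · intro i h1 h2
      simp [List.getD_eq_getElem?_getD, List.getElem?_eq_getElem (by simpa using h2)]
  | cons x t ih =>
    have hx : key x < bs.length := h x (by simp)
    rw [List.foldl_cons, ih _ (by intro y hy; simpa using h y (by simp [hy]))]
    apply List.ext_getElem
    · simp
    · intro i h1 h2
      simp only [List.length_set, List.length_map, List.length_range] at h1 h2 ⊢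
      simp only [List.getElem_map, List.getElem_range]
      by_cases hi : i = key x
      · subst hi
        rw [List.getD_eq_getElem?_getD, List.getElem?_set_self (by simpa using hx)]
        simp [List.getD_eq_getElem?_getD, List.getElem?_eq_getElem hx]
      · rw [List.getD_eq_getElem?_getD, List.getElem?_set_ne (by omega)]
        simp [List.getD_eq_getElem?_getD, Ne.symm hi]

theorem enum_shift {α : Type} (t : List α) (s : Int) :
    (PySem.List.enumerate t s).map (fun p => (p.2, p.1 + 1)) =
      (PySem.List.enumerate t (s + 1)).map (fun p => (p.2, p.1)) := by
  induction t generalizing s with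
  | nil => simp
  | cons x t ih => simp [PySem.List.enumerate_cons, ih]

-- ===== VERDICT (by name: the statement is the Claim_ definition above) =====
theorem buildRaceDict_spec : Claim_equal_buildRaceDict := by
  unfold Claim_equal_buildRaceDict
  intro rl rv _ hpre
  unfold Pre_buildRaceDict at hpre
  subst hpre
  unfold Spec_buildRaceDict buildRaceDict buildRaceDict_alt
  simp only [Bool.false_eq_true, if_false]
  set n := rl.length with hn
  -- the common popcount-ordered list
  have hbound : ∀ s ∈ (pyProduct10 n).map (fun x => String.ofList x),
      PySem.Str.count s "1" ≤ n := by
    intro s hs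
    simp only [List.mem_map] at hs
    rcases hs with ⟨x, hx, rfl⟩
    rw [count_mk_one]
    calc x.count '1' ≤ x.length := List.count_le_length
      _ = n := length_of_mem_pyProduct10 n x hx
  have hsorted := sorted_eq_flatMap_filter ((pyProduct10 n).map (fun x => String.ofList x))
      (fun s => PySem.Str.count s "1") n hbound
  have hlt : ∀ x ∈ pyProduct10 n,
      PySem.Str.count (String.ofList x) "1" < (List.replicate (n + 1) ([] : List String)).length := by
    intro x hx
    rw [count_mk_one]
    simp only [List.length_replicate]
    have := length_of_mem_pyProduct10 n x hx
    have := List.count_le_length (l := x) (a := '1')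
    omega
  have hbuck := bucket_fold (fun x => PySem.Str.count (String.ofList x) "1")
      (fun x => String.ofList x) (pyProduct10 n) (List.replicate (n + 1) ([] : List String)) hlt
  rw [hsorted, hbuck]
  have hRM : ((List.range (List.replicate (n + 1) ([] : List String)).length).map
        (fun v => (List.replicate (n + 1) ([] : List String)).getD v [] ++
          ((pyProduct10 n).filter (fun x => decide (PySem.Str.count (String.ofList x) "1" = v))).map (fun x => String.ofList x))).flatten
      = (List.range (n + 1)).flatMap
        (fun v => ((pyProduct10 n).map (fun x => String.ofList x)).filter (fun s => decide (PySem.Str.count s "1" = v))) := by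
    rw [List.flatMap_def]
    simp only [List.length_replicate]
    congr 1
    apply List.map_congr_left
    intro v hv
    simp only [List.mem_range] at hv
    rw [List.getD_replicate _ hv, List.nil_append]
    rw [List.filter_map]
    rfl
  rw [hRM]
  -- the common sorted list RM; now the dict-building tails
  set RM := (List.range (n + 1)).flatMap
      (fun v => ((pyProduct10 n).map (fun x => String.ofList x)).filter (fun s => decide (PySem.Str.count s "1" = v))) with hRMdef
  have hnodupRM : RM.Nodup := by
    have hperm : RM.Perm ((pyProduct10 n).map (fun x => String.ofList x)) := by
      rw [← hsorted]
      exact PySem.List.sorted_perm ((pyProduct10 n).map (fun x => String.ofList x)) (fun s => PySem.Str.count s "1") false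
    refine hperm.nodup_iff.mpr ?_
    exact (nodup_pyProduct10 n).map (fun a b h => by simpa using congrArg String.toList h)
  rw [PySem.List.slice_from RM (by norm_num)]
  have hT : ((1 : Int)).toNat = 1 := rfl
  rw [hT]
  set t := RM.drop 1 with htdef
  have hnodupt : t.Nodup := (List.drop_sublist 1 RM).nodup hnodupRM
  -- A's loop inserts fresh distinct keys
  have hA := PySem.Dict.items_foldl_insert_fresh (ν := Int) (PySem.List.enumerate t 0)
      (fun p => p.2) (fun p => p.1 + 1) PySem.Dict.empty
      (fun a _ => PySem.Dict.contains_empty _)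
      (by rw [PySem.List.map_snd_enumerate]; exact hnodupt)
  -- B's dict comprehension likewise
  have hB := PySem.Dict.items_foldl_insert_fresh (ν := Int)
      ((PySem.List.enumerate t 1).map (fun (p : Int × String) => (p.2, p.1)))
      (fun (p : String × Int) => p.1) (fun (p : String × Int) => p.2) PySem.Dict.empty
      (fun a _ => PySem.Dict.contains_empty _)
      (by
        rw [List.map_map]
        have : ((fun (p : String × Int) => p.1) ∘ fun (p : Int × String) => (p.2, p.1)) = fun (p : Int × String) => p.2 := rfl
        rw [this, PySem.List.map_snd_enumerate]
        exact hnodupt)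
  simp only [PySem.Dict.ofList, PySem.Dict.update]
  rw [hA] at *
  rw [hB]
  simp only [PySem.Dict.empty, List.nil_append, List.map_map]
  have : ((fun (p : String × Int) => (p.1, p.2)) ∘ fun (p : Int × String) => (p.2, p.1)) =
      fun (p : Int × String) => (p.2, p.1) := rfl
  rw [this]
  have := enum_shift t 0
  simpa using this
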